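-- pv_equiv track=rewrite | github.com/djmaki01/cryptography-project | myszkowski.py | text_box
-- ===== SOURCE A (Python) =====
-- def text_box(positions, text):
--     text = text.lower().replace(" ", "")
--     rows = len(text) // len(positions)
--     if (len(text) % len(positions)) != 0: rows = rows + 1
--     box = [[None for x in range(len(positions))] for y in range(rows)]
--     for i in range(rows):
--         for j in range(len(positions)):
--             if len(text) > 0:
--                 box[i][j] = text[0]
--                 text = text[1:]
--     return box, rows, len(positions)
-- ===== SOURCE B (Python) =====
-- def text_box(positions, text):
--     cleaned = text.lower().replace(" ", "")
--     cols = len(positions)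
--     rows = len(cleaned) // cols
--     if len(cleaned) % cols != 0:
--         rows = rows + 1
--     box = []
--     for i in range(rows):
--         chunk = cleaned[i * cols:(i + 1) * cols]
--         box.append(list(chunk) + [None] * (cols - len(chunk)))
--     return box, rows, cols
-- ===== Notes on version B (the rewrite author's own statement) =====
-- stated objective: faster
-- what changed: Replaces the preallocated grid plus nested cell-by-cell loop that re-slices the text by one character per cell (text = text[1:]) with a single loop that slices the cleaned text into row-sized chunks and pads each with None.
import Mathlib
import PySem

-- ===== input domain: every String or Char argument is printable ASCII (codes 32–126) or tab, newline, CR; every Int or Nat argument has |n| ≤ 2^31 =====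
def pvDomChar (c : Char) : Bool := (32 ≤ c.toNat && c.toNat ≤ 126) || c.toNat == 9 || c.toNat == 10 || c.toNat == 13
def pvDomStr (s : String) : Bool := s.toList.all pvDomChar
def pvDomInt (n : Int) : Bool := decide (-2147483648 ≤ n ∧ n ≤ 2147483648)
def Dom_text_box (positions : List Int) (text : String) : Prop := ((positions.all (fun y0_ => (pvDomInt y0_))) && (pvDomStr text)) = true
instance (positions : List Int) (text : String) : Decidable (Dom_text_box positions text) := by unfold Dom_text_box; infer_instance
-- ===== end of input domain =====

-- B replaces A's preallocated grid + nested cell-by-cell fill (which re-slices the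
-- text one character at a time) by a single loop slicing the cleaned text into
-- row-sized chunks padded with none: a simpler, single-pass decomposition.

-- ===== PORT A =====
-- pvCell c = the 1-character Python string text[0] stored in a cell
def pvCell (c : Char) : Option String := some (String.singleton c)

-- body of A's inner loop: 'if len(text) > 0: box[i][j] = text[0]; text = text[1:]'
def pvCellStep (i : Nat) (s : List (List (Option String)) × List Char) (j : Nat) :
    List (List (Option String)) × List Char :=
  if s.2.length > 0 then
    (s.1.set i ((s.1.getD i []).set j (pvCell s.2.head!)), s.2.tail)
  else s

-- A's inner loop 'for j in range(len(positions))' for row i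
def pvInnerA (cols i : Nat) (s : List (List (Option String)) × List Char) :
    List (List (Option String)) × List Char :=
  (List.range cols).foldl (pvCellStep i) s

def text_box (positions : List Int) (text : String) : List (List (Option String)) × Int × Int :=
  let t : List Char := (PySem.Str.replace (PySem.Str.lower text) " " "").toList
  let cols : Nat := positions.length
  let rows0 : Int := PySem.Int.floordiv (t.length : Int) (cols : Int)
  let rows : Int := if PySem.Int.mod (t.length : Int) (cols : Int) ≠ 0 then rows0 + 1 else rows0
  -- box = [[None for x in range(len(positions))] for y in range(rows)]
  let box : List (List (Option String)) :=
    (List.range rows.toNat).map (fun _ => (List.range cols).map (fun _ => (none : Option String)))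
  let r := (List.range rows.toNat).foldl (fun s i => pvInnerA cols i s) (box, t)
  (r.1, rows, (cols : Int))

-- ===== PORT B =====
def text_box_alt (positions : List Int) (text : String) : List (List (Option String)) × Int × Int :=
  let cleaned : List Char := (PySem.Str.replace (PySem.Str.lower text) " " "").toList
  let cols : Nat := positions.length
  let rows0 : Int := PySem.Int.floordiv (cleaned.length : Int) (cols : Int)
  let rows : Int := if PySem.Int.mod (cleaned.length : Int) (cols : Int) ≠ 0 then rows0 + 1 else rows0
  -- chunk = cleaned[i*cols:(i+1)*cols] (nonnegative in-range bounds, so drop/take is exact)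
  let box : List (List (Option String)) :=
    (List.range rows.toNat).foldl (fun acc i =>
      let chunk := (cleaned.drop (i * cols)).take cols
      acc ++ [chunk.map pvCell ++ List.replicate (cols - chunk.length) (none : Option String)]) []
  (box, rows, (cols : Int))

-- ===== PRECONDITION & SPEC =====
-- Pre_ excludes only the empty positions list, on which A raises ZeroDivisionError.
def Pre_text_box (positions : List Int) (text : String) : Prop := positions ≠ []
instance (positions : List Int) (text : String) : Decidable (Pre_text_box positions text) := by
  unfold Pre_text_box; infer_instance

def pvWitness_text_box : List Int × String := ([1, 2], "Ab cD")

def Spec_text_box (positions : List Int) (text : String) (out : List (List (Option String)) × Int × Int) : Prop := out = text_box_alt positions text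
instance (positions : List Int) (text : String) (out : List (List (Option String)) × Int × Int) : Decidable (Spec_text_box positions text out) := by unfold Spec_text_box; infer_instance

-- ===== CLAIM (what is proved, stated in full; the proofs are below) =====
def Claim_equal_text_box : Prop := ∀ (positions : List Int) (text : String), Dom_text_box positions text → Pre_text_box positions text → Spec_text_box positions text (text_box positions text)

-- ===== LEMMAS AND PROOFS =====

-- characterisation of A's written row: write up to n chars of t at positions j, j+1, …
def pvWriteFrom (r : List (Option String)) (j : Nat) (t : List Char) (n : Nat) :
    List (Option String) :=
  match n, t with
  | 0, _ => r
  | _ + 1, [] => r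
  | n + 1, c :: t' => pvWriteFrom (r.set j (pvCell c)) (j + 1) t' n

-- B's rows, written as structural recursion on the remaining text
def pvChunks (cols : Nat) (t : List Char) (n : Nat) : List (List (Option String)) :=
  match n with
  | 0 => []
  | n + 1 =>
      ((t.take cols).map pvCell ++ List.replicate (cols - t.length) (none : Option String))
        :: pvChunks cols (t.drop cols) n

theorem pvWriteFrom_nil (r : List (Option String)) (j n : Nat) :
    pvWriteFrom r j [] n = r := by cases n <;> rfl

theorem pv_set_getD_self {α : Type} (l : List α) (i : Nat) (d : α) :
    l.set i (l.getD i d) = l := by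
  induction l generalizing i with
  | nil => rfl
  | cons x xs ih =>
      cases i with
      | zero => rfl
      | succ n => show x :: xs.set n (xs.getD n d) = x :: xs; rw [ih]

theorem pv_getD_set_self {α : Type} (l : List α) (i : Nat) (x d : α) :
    (l.set i x).getD i d = if i < l.length then x else d := by
  induction l generalizing i with
  | nil => simp [List.getD]
  | cons y ys ih =>
      cases i with
      | zero => rfl
      | succ n => show (ys.set n x).getD n d = _; rw [ih]; simp

theorem pv_set_append_len {α : Type} (p q : List α) (y x : α) :
    (p ++ y :: q).set p.length x = p ++ x :: q := by
  induction p with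
  | nil => rfl
  | cons a p ih => simp [ih]

theorem pv_getD_append_len {α : Type} (p q : List α) (y d : α) :
    (p ++ y :: q).getD p.length d = y := by
  induction p with
  | nil => rfl
  | cons a p ih => simpa using ih

theorem pv_inner_spec (i : Nat) (n j : Nat) (box : List (List (Option String))) (t : List Char) :
    (List.range' j n).foldl (pvCellStep i) (box, t)
      = (box.set i (pvWriteFrom (box.getD i []) j t n), t.drop n) := by
  induction n generalizing j box t with
  | zero => simp only [List.range', List.foldl_nil, pvWriteFrom, List.drop_zero, pv_set_getD_self]
  | succ n ih =>
      rw [List.range'_succ]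
      cases t with
      | nil =>
          simp only [List.foldl_cons, pvCellStep]
          simp [ih, pvWriteFrom_nil, pvWriteFrom]
      | cons c t' =>
          simp only [List.foldl_cons, pvCellStep, List.length_cons]
          have hpos : (0 : Nat) < t'.length + 1 := Nat.succ_pos _
          simp only [if_pos hpos, List.head!, List.tail_cons]
          rw [ih]
          have hX : ((box.set i ((box.getD i []).set j (pvCell c))).getD i [])
              = (box.getD i []).set j (pvCell c) := by
            rw [pv_getD_set_self]
            split
            · rfl
            · rename_i h
              have : i ≥ box.length := Nat.le_of_not_lt h
              simp [List.getD_eq_getElem?_getD, List.getElem?_eq_none (by simpa using this)]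
          rw [hX, List.set_set]
          rfl

theorem pv_writeFrom_blank (n : Nat) (t : List Char) (p : List (Option String)) :
    pvWriteFrom (p ++ List.replicate n (none : Option String)) p.length t n
      = p ++ (t.take n).map pvCell ++ List.replicate (n - t.length) (none : Option String) := by
  induction n generalizing t p with
  | zero => simp [pvWriteFrom]
  | succ n ih =>
      cases t with
      | nil => simp [pvWriteFrom]
      | cons c t' =>
          simp only [pvWriteFrom, List.replicate_succ, pv_set_append_len]
          have : p ++ pvCell c :: List.replicate n (none : Option String)
              = (p ++ [pvCell c]) ++ List.replicate n (none : Option String) := by simp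
          rw [this]
          have hlen : p.length + 1 = (p ++ [pvCell c]).length := by simp
          rw [hlen, ih]
          simp [Nat.succ_sub_succ]

theorem pv_map_range_const {α : Type} (n : Nat) (a : α) :
    (List.range n).map (fun _ => a) = List.replicate n a := by
  induction n with
  | zero => rfl
  | succ n ih => rw [List.range_succ, List.map_append, ih, List.replicate_succ']; rfl

theorem pv_outer_spec (cols : Nat) (n : Nat) (done : List (List (Option String))) (t : List Char) :
    (List.range' done.length n).foldl (fun s i => pvInnerA cols i s)
        (done ++ List.replicate n (List.replicate cols (none : Option String)), t)
      = (done ++ pvChunks cols t n, t.drop (n * cols)) := by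
  induction n generalizing done t with
  | zero => simp [pvChunks]
  | succ n ih =>
      rw [List.range'_succ, List.foldl_cons, List.replicate_succ]
      have h1 : pvInnerA cols done.length
          (done ++ List.replicate cols (none : Option String) :: List.replicate n (List.replicate cols (none : Option String)), t)
          = ((done ++ [(t.take cols).map pvCell ++ List.replicate (cols - t.length) (none : Option String)])
              ++ List.replicate n (List.replicate cols (none : Option String)), t.drop cols) := by
        rw [pvInnerA, List.range_eq_range', pv_inner_spec, pv_getD_append_len]
        have := pv_writeFrom_blank cols t []
        simp only [List.nil_append, List.length_nil] at this
        rw [this, pv_set_append_len]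
        simp
      rw [h1]
      have h2 := ih (done ++ [(t.take cols).map pvCell ++ List.replicate (cols - t.length) (none : Option String)]) (t.drop cols)
      simp only [List.length_append, List.length_cons, List.length_nil, Nat.add_zero] at h2 ⊢
      rw [h2]
      refine congrArg₂ Prod.mk ?_ ?_
      · simp [pvChunks]
      · rw [List.drop_drop]
        congr 1
        ring

theorem pv_chunks_eq (cols : Nat) (n : Nat) (t : List Char) :
    (List.range n).foldl (fun acc i =>
        acc ++ [((t.drop (i * cols)).take cols).map pvCell
          ++ List.replicate (cols - ((t.drop (i * cols)).take cols).length) (none : Option String)]) []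
      = pvChunks cols t n := by
  rw [PySem.List.foldl_append_singleton_eq_map, List.nil_append]
  induction n generalizing t with
  | zero => rfl
  | succ n ih =>
      rw [List.range_succ_eq_map, List.map_cons, List.map_map]
      congr 1
      · simp only [Nat.zero_mul, List.drop_zero, pvChunks]
        congr 2
        rw [List.length_take]
        omega
      · rw [← ih (t.drop cols)]
        apply List.map_congr_left
        intro i _
        simp only [Function.comp_apply, Nat.succ_mul, ← List.drop_drop]
        rw [show List.drop cols (List.drop (i * cols) t) = List.drop (i * cols) (List.drop cols t) by
          rw [List.drop_drop, List.drop_drop, Nat.add_comm]]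

theorem pv_box_eq (cols n : Nat) (t : List Char) :
    ((List.range n).foldl (fun s i => pvInnerA cols i s)
        ((List.range n).map (fun _ => (List.range cols).map (fun _ => (none : Option String))), t)).1
      = (List.range n).foldl (fun acc i =>
          acc ++ [((t.drop (i * cols)).take cols).map pvCell
            ++ List.replicate (cols - ((t.drop (i * cols)).take cols).length) (none : Option String)]) [] := by
  rw [pv_map_range_const, pv_map_range_const, pv_chunks_eq]
  have h := pv_outer_spec cols n [] t
  simp only [List.nil_append, List.length_nil] at h
  rw [List.range_eq_range', h]

theorem text_box_spec : Claim_equal_text_box := by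
  intro positions text _ _
  unfold Spec_text_box
  simp only [text_box, text_box_alt]
  exact congrArg₂ Prod.mk (pv_box_eq _ _ _) rfl
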